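-- pv_equiv track=rewrite | github.com/wbopan/agent-memory-evolution | src/programmaticmemory/benchmarks/nyt_connections.py | _count_correct_groups
-- ===== SOURCE A (Python) =====
-- def _count_correct_groups(predicted: list[set[str]], answer: list[set[str]]) -> int:
--     """Count exact group matches via bipartite matching."""
--     correct = 0
--     used: set[int] = set()
--     for pred in predicted:
--         for i, ans in enumerate(answer):
--             if i in used:
--                 continue
--             if pred == ans:
--                 correct += 1
--                 used.add(i)
--                 break
--     return correct
-- ===== SOURCE B (Python) =====
-- def _count_correct_groups(predicted: list[set[str]], answer: list[set[str]]) -> int: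
--     """Count exact group matches: per-key minimum of two frequency tables."""
--     pkeys = [frozenset(p) for p in predicted]
--     akeys = [frozenset(a) for a in answer]
--     ac = {}
--     for k in akeys:
--         ac[k] = ac.get(k, 0) + 1
--     pc = {}
--     for k in pkeys:
--         pc[k] = pc.get(k, 0) + 1
--     return sum(min(c, ac.get(k, 0)) for k, c in pc.items())
-- ===== Notes on version B (the rewrite author's own statement) =====
-- stated objective: alternative
-- what changed: Replaces A's greedy per-predicted scan over answers with a 'used' index set by building two frequency tables keyed by the group-as-frozenset and summing per-key minima (multiset intersection); correctness rests on greedy first-unused exact matching equalling the per-value min count.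
import Mathlib
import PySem

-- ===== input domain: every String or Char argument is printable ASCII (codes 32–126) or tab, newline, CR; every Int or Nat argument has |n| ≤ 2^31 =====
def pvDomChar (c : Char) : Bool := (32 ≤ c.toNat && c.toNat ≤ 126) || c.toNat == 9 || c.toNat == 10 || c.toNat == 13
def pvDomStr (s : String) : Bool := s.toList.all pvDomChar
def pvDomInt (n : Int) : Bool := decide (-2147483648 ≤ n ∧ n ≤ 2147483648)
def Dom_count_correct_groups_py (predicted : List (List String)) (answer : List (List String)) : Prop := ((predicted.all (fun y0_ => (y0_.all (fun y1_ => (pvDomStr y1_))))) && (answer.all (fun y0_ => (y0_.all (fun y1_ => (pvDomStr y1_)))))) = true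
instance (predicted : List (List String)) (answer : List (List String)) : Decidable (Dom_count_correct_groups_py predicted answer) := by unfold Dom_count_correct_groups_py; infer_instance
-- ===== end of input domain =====

-- B replaces A's greedy matching loop with its `used` index set by two frequency tables keyed by
-- the group-as-set and a sum of per-key minima (objective: alternative decomposition, same result).

-- ===== PORT A =====
-- `pred == ans` on Python sets is set equality of the distinct-element lists.
def pvSetEq (p a : List String) : Bool := PySem.Set.equal (PySem.Set.ofList p) (PySem.Set.ofList a)

-- the inner `for i, ans in enumerate(answer): … continue … break` scan for one `pred`
def pvFindMatch (pred : List String) (pairs : List (Int × List String)) (used : PySem.Set Int) : Option Int :=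
  match pairs with
  | [] => none
  | (i, ans) :: rest =>
    if used.contains i then pvFindMatch pred rest used
    else if pvSetEq pred ans then some i
    else pvFindMatch pred rest used

-- the outer `for pred in predicted` loop, state = (correct, used)
def pvLoopA (enumAns : List (Int × List String)) : List (List String) → Int → PySem.Set Int → Int
  | [], correct, _ => correct
  | pred :: rest, correct, used =>
    match pvFindMatch pred enumAns used with
    | some i => pvLoopA enumAns rest (correct + 1) (used.add i)
    | none => pvLoopA enumAns rest correct used

def count_correct_groups_py (predicted : List (List String)) (answer : List (List String)) : Int :=
  pvLoopA (PySem.List.enumerate answer) predicted 0 PySem.Set.empty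

-- ===== PORT B =====
-- `frozenset(g)` modelled by its canonically sorted distinct-element list: exact, since
-- frozenset equality (the only thing B's dicts use of their keys) is set equality.
def pvKey (g : List String) : List String := PySem.List.sorted (PySem.Set.ofList g) (fun x => x)

def count_correct_groups_py_alt (predicted : List (List String)) (answer : List (List String)) : Int :=
  let pkeys := predicted.map (fun p => pvKey p)
  let akeys := answer.map (fun a => pvKey a)
  let ac := akeys.foldl (fun d k => d.insert k (d.getD k 0 + 1)) PySem.Dict.empty
  let pc := pkeys.foldl (fun d k => d.insert k (d.getD k 0 + 1)) PySem.Dict.empty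
  (pc.items.map (fun q => min q.2 (ac.getD q.1 0))).sum

-- ===== PRECONDITION & SPEC =====
def Spec_count_correct_groups_py (predicted : List (List String)) (answer : List (List String)) (out : Int) : Prop := out = count_correct_groups_py_alt predicted answer
instance (predicted : List (List String)) (answer : List (List String)) (out : Int) : Decidable (Spec_count_correct_groups_py predicted answer out) := by unfold Spec_count_correct_groups_py; infer_instance

-- ===== CLAIM (what is proved, stated in full; the proofs are below) =====
def Claim_equal_count_correct_groups_py : Prop := ∀ (predicted : List (List String)) (answer : List (List String)), Dom_count_correct_groups_py predicted answer → Spec_count_correct_groups_py predicted answer (count_correct_groups_py predicted answer)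

-- ===== LEMMAS AND PROOFS =====

-- the common mathematical core: greedily match each key against the first remaining copy
def pvNG : List (List String) → List (List String) → Nat
  | [], _ => 0
  | k :: ks, A => if k ∈ A then 1 + pvNG ks (A.erase k) else pvNG ks A

-- keys are equal iff the sets are equal
theorem pvSetEq_iff_key (p a : List String) : pvSetEq p a = true ↔ pvKey p = pvKey a := by
  unfold pvSetEq pvKey
  rw [PySem.Set.equal_iff]
  constructor
  · intro h
    have hperm : (PySem.List.sorted (PySem.Set.ofList p) (fun x => x) false).Perm (PySem.Set.ofList a) := by
      refine ((PySem.List.sorted_perm _ _ _).trans ?_)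
      exact List.perm_of_nodup_nodup_toFinset_eq (PySem.Set.nodup_ofList p) (PySem.Set.nodup_ofList a)
        (by ext x; simp [List.mem_toFinset, PySem.Set.mem_ofList, h x, PySem.Set.mem_ofList])
    exact (PySem.List.sorted_eq_of_perm_of_pairwise_lt _ _ _ hperm
      (PySem.List.sorted_ofList_pairwise_lt p)).symm ▸ rfl
  · intro h x
    have hp := PySem.List.mem_sorted (xs := PySem.Set.ofList p) (key := fun x => x) (rev := false) (x := x)
    have ha := PySem.List.mem_sorted (xs := PySem.Set.ofList a) (key := fun x => x) (rev := false) (x := x)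
    rw [← hp, ← ha, h]

-- B computes Σ_{k ∈ dedup P} min (count k P) (count k A) over the key lists
theorem pvAlt_eq_sum (predicted answer : List (List String)) :
    count_correct_groups_py_alt predicted answer =
      ((((PySem.Set.ofList (predicted.map pvKey)).map
        (fun k => min ((predicted.map pvKey).count k) ((answer.map pvKey).count k))).sum : Nat) : Int) := by
  unfold count_correct_groups_py_alt
  simp only [PySem.Dict.foldl_insert_getD_add_one_eq_counter, PySem.Dict.items_counter,
    PySem.Dict.getD_counter, List.map_map]
  push_cast
  rw [List.map_map]
  congr 1
  apply List.map_congr_left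
  intro k hk
  simp [Nat.cast_min]

theorem pvNG_eq_finset (P A : List (List String)) :
    pvNG P A = ∑ k ∈ P.toFinset, min (P.count k) (A.count k) := by
  induction P generalizing A with
  | nil => simp [pvNG]
  | cons k ks ih =>
    have hS : (k :: ks).toFinset = insert k ks.toFinset := List.toFinset_cons
    set S : Finset (List String) := insert k ks.toFinset with hSdef
    have hkS : k ∈ S := Finset.mem_insert_self k ks.toFinset
    set g : List String → Nat := fun j => min (ks.count j) ((A.erase k).count j) with hg
    set h : List String → Nat := fun j => min ((k :: ks).count j) (A.count j) with hh
    have hpoint : ∀ j, h j = g j + (if j = k then (if k ∈ A then 1 else 0) else 0) := by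
      intro j
      by_cases hj : j = k
      · by_cases hkA : k ∈ A
        · have h1 : 1 ≤ A.count k := List.count_pos_iff.mpr hkA
          simp [hg, hh, hj, hkA, List.count_erase_self]
          omega
        · have h0 : A.count k = 0 := List.count_eq_zero.mpr hkA
          simp [hg, hh, hj, hkA, List.erase_of_not_mem hkA, h0]
      · simp [hg, hh, List.count_cons, hj, Ne.symm hj, List.count_erase_of_ne hj]
    have hsum_h : ∑ j ∈ S, h j = (∑ j ∈ S, g j) + (if k ∈ A then 1 else 0) := by
      calc ∑ j ∈ S, h j = ∑ j ∈ S, (g j + (if j = k then (if k ∈ A then 1 else 0) else 0)) :=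
            Finset.sum_congr rfl (fun j _ => hpoint j)
        _ = (∑ j ∈ S, g j) + ∑ j ∈ S, (if j = k then (if k ∈ A then 1 else 0) else 0) :=
            Finset.sum_add_distrib
        _ = (∑ j ∈ S, g j) + (if k ∈ A then 1 else 0) := by
            rw [Finset.sum_ite_eq' S k (fun _ => (if k ∈ A then 1 else 0)), if_pos hkS]
    have hgS : ∑ j ∈ ks.toFinset, g j = ∑ j ∈ S, g j := by
      by_cases hmem : k ∈ ks.toFinset
      · rw [hSdef, Finset.insert_eq_self.mpr hmem]
      · rw [hSdef, Finset.sum_insert hmem]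
        have : g k = 0 := by
          have : ks.count k = 0 := List.count_eq_zero.mpr (by simpa using hmem)
          simp [hg, this]
        omega
    have hNG : pvNG (k :: ks) A = (if k ∈ A then 1 else 0) + ∑ j ∈ ks.toFinset, g j := by
      by_cases hkA : k ∈ A
      · rw [pvNG, if_pos hkA, if_pos hkA, ih]
      · rw [pvNG, if_neg hkA, if_neg hkA, ih, Nat.zero_add]
        simp [hg, List.erase_of_not_mem hkA]
    have hRS : ∑ j ∈ (k :: ks).toFinset, min ((k :: ks).count j) (A.count j) = ∑ j ∈ S, h j := by
      rw [hS]
    rw [hNG, hgS, hRS, hsum_h]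
    omega

-- the min-count sum equals the greedy matcher
theorem pvNG_eq_sum (P A : List (List String)) :
    pvNG P A = ((PySem.Set.ofList P).map (fun k => min (P.count k) (A.count k))).sum := by
  rw [pvNG_eq_finset]
  rw [← List.sum_toFinset _ (PySem.Set.nodup_ofList P)]
  congr 1
  ext x
  simp [PySem.Set.mem_ofList]

-- A's inner scan is find?-over-the-unused-entries
theorem pvFindMatch_eq (p : List String) (E : List (Int × List String)) (used : PySem.Set Int) :
    pvFindMatch p E used =
      ((E.filter (fun q => !used.contains q.1)).find? (fun q => pvSetEq p q.2)).map (·.1) := by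
  induction E with
  | nil => rfl
  | cons q rest ih =>
    obtain ⟨i, ans⟩ := q
    by_cases hu : i ∈ used
    · simp [pvFindMatch, PySem.Set.contains, hu, ih]
    · by_cases hm : pvSetEq p ans
      · simp [pvFindMatch, PySem.Set.contains, hu, hm]
      · simp [pvFindMatch, PySem.Set.contains, hu, hm, ih]

-- the filter with `used.add i` refines the filter with `used`
theorem pvFilter_add (E : List (Int × List String)) (used : PySem.Set Int) (i : Int) :
    E.filter (fun q => !(used.add i).contains q.1) =
      (E.filter (fun q => !used.contains q.1)).filter (fun q => !(q.1 == i)) := by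
  rw [List.filter_filter]
  apply List.filter_congr
  intro q _
  simp [PySem.Set.contains, PySem.Set.mem_add]
  cases h1 : decide (q.1 ∈ used) <;> cases h2 : (q.1 == i) <;> simp_all

-- removing the matched entry from the unused pool = erasing its key from the key pool
theorem pvErase_key (p : List String) :
    ∀ (F : List (Int × List String)) (i : Int) (a : List String),
      F.find? (fun q => pvSetEq p q.2) = some (i, a) → (F.map (·.1)).Nodup →
      (F.filter (fun q => !(q.1 == i))).map (fun q => pvKey q.2) =
        ((F.map (fun q => pvKey q.2)).erase (pvKey p)) := by
  intro F
  induction F with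
  | nil => intro i a h; simp at h
  | cons q rest ih =>
    intro i a hfind hnd
    obtain ⟨hni, hndr⟩ := List.nodup_cons.mp (by simpa only [List.map_cons] using hnd)
    by_cases hm : pvSetEq p q.2 = true
    · rw [List.find?_cons_of_pos (p := fun (r : Int × List String) => pvSetEq p r.2) hm] at hfind
      obtain rfl : q = (i, a) := by simpa using hfind
      have hkey : pvKey p = pvKey a := (pvSetEq_iff_key p a).mp hm
      have hfil : List.filter (fun q => !(q.1 == i)) rest = rest :=
        List.filter_eq_self.mpr (fun r hr => by
          have hr1 : r.1 ≠ i := fun h => hni (by rw [← h]; exact List.mem_map.mpr ⟨r, hr, rfl⟩)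
          simpa using hr1)
      have hhead : (!((( (i, a) : Int × List String)).1 == i)) = false := by simp
      rw [List.filter_cons, hhead, if_neg (by simp), hfil, List.map_cons, hkey,
        List.erase_cons_head]
    · rw [List.find?_cons_of_neg (p := fun (r : Int × List String) => pvSetEq p r.2) hm] at hfind
      have hmem : (i, a) ∈ rest := List.mem_of_find?_eq_some hfind
      have hqi : q.1 ≠ i := fun h => hni (by rw [h]; exact List.mem_map.mpr ⟨(i, a), hmem, rfl⟩)
      have hkne : pvKey q.2 ≠ pvKey p := fun h => hm ((pvSetEq_iff_key p q.2).mpr h.symm)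
      rw [List.filter_cons, if_pos (by simpa using hqi), List.map_cons, List.map_cons,
        List.erase_cons_tail (by simpa using hkne), ih i a hfind hndr]

-- A's loop = greedy matcher on the keys of the still-unused entries
theorem pvLoopA_eq (E : List (Int × List String)) (hE : E.Pairwise (fun p q => p.1 < q.1)) :
    ∀ (ps : List (List String)) (c : Int) (used : PySem.Set Int),
      pvLoopA E ps c used =
        c + pvNG (ps.map pvKey) ((E.filter (fun q => !used.contains q.1)).map (fun q => pvKey q.2)) := by
  intro ps
  induction ps with
  | nil => intro c used; simp [pvLoopA, pvNG]
  | cons pred rest ih =>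
    intro c used
    have hndF : (((E.filter (fun q => !used.contains q.1)).map (·.1)).Nodup) := by
      have hpF : (E.filter (fun q => !used.contains q.1)).Pairwise (fun p q => p.1 < q.1) :=
        hE.filter _
      have hlt : ((E.filter (fun q => !used.contains q.1)).map (·.1)).Pairwise (· < ·) :=
        List.Pairwise.map _ (fun a b h => h) hpF
      exact hlt.imp (fun h => ne_of_lt h)
    rw [pvLoopA]
    cases hF : pvFindMatch pred E used with
    | none =>
      simp only []
      rw [pvFindMatch_eq] at hF
      have hfn : (E.filter (fun q => !used.contains q.1)).find? (fun q => pvSetEq pred q.2) = none := by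
        cases h : (E.filter (fun q => !used.contains q.1)).find? (fun q => pvSetEq pred q.2) with
        | none => rfl
        | some x => rw [h] at hF; simp at hF
      have hnm : pvKey pred ∉ (E.filter (fun q => !used.contains q.1)).map (fun q => pvKey q.2) := by
        intro hmem
        obtain ⟨q, hq, hkq⟩ := List.mem_map.mp hmem
        have := List.find?_eq_none.mp hfn q hq
        exact this ((pvSetEq_iff_key pred q.2).mpr hkq.symm)
      rw [List.map_cons, pvNG, if_neg hnm, ih c used]
    | some i =>
      simp only []
      rw [pvFindMatch_eq] at hF
      obtain ⟨⟨i', a⟩, hfs, hi⟩ := Option.map_eq_some_iff.mp hF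
      obtain rfl : i' = i := hi
      have hmm : pvKey pred ∈ (E.filter (fun q => !used.contains q.1)).map (fun q => pvKey q.2) := by
        refine List.mem_map.mpr ⟨(i', a), List.mem_of_find?_eq_some hfs, ?_⟩
        exact ((pvSetEq_iff_key pred a).mp (by simpa using List.find?_some hfs)).symm
      rw [ih (c + 1) (used.add i'), pvFilter_add, pvErase_key pred _ i' a hfs hndF,
        List.map_cons, pvNG, if_pos hmm]
      push_cast
      ring

-- ===== VERDICT (by name: the statement is the Claim_ definition above) =====
theorem count_correct_groups_py_spec : Claim_equal_count_correct_groups_py := by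
  intro predicted answer _
  unfold Spec_count_correct_groups_py count_correct_groups_py
  rw [pvLoopA_eq _ (PySem.List.pairwise_lt_enumerate answer 0), pvAlt_eq_sum, pvNG_eq_sum]
  have hfil : (PySem.List.enumerate answer 0).filter (fun q => !(PySem.Set.empty : PySem.Set Int).contains q.1) = PySem.List.enumerate answer 0 :=
    List.filter_eq_self.mpr (fun q _ => by simp [PySem.Set.empty, PySem.Set.contains])
  rw [hfil]
  have hsnd : (PySem.List.enumerate answer 0).map (fun q => pvKey q.2) = answer.map pvKey := by
    rw [show (fun (q : Int × List String) => pvKey q.2) = pvKey ∘ (fun q => q.2) from rfl,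
      ← List.map_map, PySem.List.map_snd_enumerate]
  rw [hsnd]
  push_cast
  ring
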